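-- pv_equiv track=rewrite | github.com/usMath/tetris-4w-solver | solver_lib.py | unhash_board
-- ===== SOURCE A (Python) =====
-- def unhash_board(board_hash):
--     board = []
--     while board_hash > 0:
--         row_hash = board_hash % 16
--         board_hash //= 16
--         board.append([])
--         for square_num in range(4):
--             board[-1].append(row_hash % 2)
--             row_hash //= 2
--     return board
-- ===== SOURCE B (Python) =====
-- def unhash_board(board_hash):
--     # Pass 1: flatten the hash into a single LSB-first bit list.
--     bits = []
--     while board_hash > 0:
--         bits.append(board_hash % 2)
--         board_hash //= 2
--     # Pass 2: group the bits into rows of 4, zero-padding the last row.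
--     board = []
--     while bits:
--         row = bits[:4]
--         board.append(row + [0] * (4 - len(row)))
--         bits = bits[4:]
--     return board
-- ===== Notes on version B (the rewrite author's own statement) =====
-- stated objective: alternative
-- what changed: Replaces A's nested loops (outer nibble extraction %16//16 with an inner 4-iteration bit loop) by two flat passes: flatten the whole hash into one LSB-first bit list, then group that list into rows of 4 with zero padding of the last row.
import Mathlib
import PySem

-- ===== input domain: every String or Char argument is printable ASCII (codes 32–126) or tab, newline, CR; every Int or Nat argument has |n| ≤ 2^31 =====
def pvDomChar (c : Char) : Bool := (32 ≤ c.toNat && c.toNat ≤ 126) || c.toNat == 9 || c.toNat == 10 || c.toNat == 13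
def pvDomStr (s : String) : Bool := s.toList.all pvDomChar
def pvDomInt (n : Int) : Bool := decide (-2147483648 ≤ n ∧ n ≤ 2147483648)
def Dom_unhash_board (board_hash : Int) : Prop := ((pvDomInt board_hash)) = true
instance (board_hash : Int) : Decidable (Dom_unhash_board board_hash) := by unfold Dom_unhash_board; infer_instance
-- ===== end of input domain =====

-- B replaces A's nested nibble/bit loops by two flat passes (flatten to a bit list, then group
-- into padded rows of 4); same cost, plainer structure (objective: alternative decomposition).

-- ===== PORT A =====
-- while board_hash > 0: row_hash = board_hash % 16; board_hash //= 16;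
--   row built by 'for square_num in range(4): append(row_hash % 2); row_hash //= 2'
def unhash_board (board_hash : Int) : List (List Int) :=
  if hpos : board_hash > 0 then
    ((PySem.List.pyRange 0 4 1).foldl
        (fun (st : List Int × Int) _ =>
          (st.1 ++ [PySem.Int.mod st.2 2], PySem.Int.floordiv st.2 2))
        ([], PySem.Int.mod board_hash 16)).1
      :: unhash_board (PySem.Int.floordiv board_hash 16)
  else []
termination_by board_hash.toNat
decreasing_by
  rw [PySem.Int.floordiv_eq_ediv_of_pos (by omega : (0:Int) < 16)]; omega

-- ===== PORT B =====
-- pass 1 of Source B: while board_hash > 0: bits.append(board_hash % 2); board_hash //= 2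
def pvBitsB (board_hash : Int) : List Int :=
  if hpos : board_hash > 0 then
    PySem.Int.mod board_hash 2 :: pvBitsB (PySem.Int.floordiv board_hash 2)
  else []
termination_by board_hash.toNat
decreasing_by
  rw [PySem.Int.floordiv_eq_ediv_of_pos (by omega : (0:Int) < 2)]; omega

-- pass 2 of Source B: while bits: row = bits[:4]; append(row + [0]*(4-len(row))); bits = bits[4:]
-- (bits[:4] = take 4 and bits[4:] = drop 4, exact on lists: PySem.List.slice_to_natCast / slice_from_natCast)
def pvChunksB (bits : List Int) : List (List Int) :=
  if h : bits = [] then []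
  else
    (bits.take 4 ++ List.replicate (4 - (bits.take 4).length) 0) :: pvChunksB (bits.drop 4)
termination_by bits.length
decreasing_by
  cases bits with
  | nil => exact absurd rfl h
  | cons a t => simp

def unhash_board_alt (board_hash : Int) : List (List Int) :=
  pvChunksB (pvBitsB board_hash)

-- ===== PRECONDITION & SPEC =====
def Spec_unhash_board (board_hash : Int) (out : List (List Int)) : Prop := out = unhash_board_alt board_hash
instance (board_hash : Int) (out : List (List Int)) : Decidable (Spec_unhash_board board_hash out) := by unfold Spec_unhash_board; infer_instance

-- ===== CLAIM (what is proved, stated in full; the proofs are below) =====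
def Claim_equal_unhash_board : Prop := ∀ (board_hash : Int), Dom_unhash_board board_hash → Spec_unhash_board board_hash (unhash_board board_hash)

-- ===== LEMMAS AND PROOFS =====

theorem pvBitsB_nonpos {h : Int} (hn : ¬ h > 0) : pvBitsB h = [] := by
  unfold pvBitsB; simp [hn]

theorem pvBitsB_pos {h : Int} (hp : h > 0) : pvBitsB h = h % 2 :: pvBitsB (h / 2) := by
  rw [pvBitsB, dif_pos hp,
      PySem.Int.mod_eq_emod_of_pos (by omega : (0:Int) < 2),
      PySem.Int.floordiv_eq_ediv_of_pos (by omega : (0:Int) < 2)]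

theorem pvBitsB_drop_one (h : Int) : (pvBitsB h).drop 1 = pvBitsB (h / 2) := by
  by_cases hp : h > 0
  · rw [pvBitsB_pos hp]; rfl
  · rw [pvBitsB_nonpos hp, pvBitsB_nonpos (by omega)]; rfl

theorem pvBitsB_drop_four (h : Int) :
    (pvBitsB h).drop 4 = pvBitsB (h / 16) := by
  have e : ∀ x : Int, (pvBitsB x).drop 1 = pvBitsB (x / 2) := pvBitsB_drop_one
  have : (pvBitsB h).drop 4 = ((((pvBitsB h).drop 1).drop 1).drop 1).drop 1 := by
    simp
  rw [this, e, e, e, e]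
  have : h / 2 / 2 / 2 / 2 = h / 16 := by omega
  rw [this]

-- the padded 4-prefix of a bit list, as pass 2 computes it
def pvPad4 (l : List Int) : List Int := l.take 4 ++ List.replicate (4 - (l.take 4).length) 0

theorem pvPad4_bits {h : Int} (hp : 0 ≤ h) :
    pvPad4 (pvBitsB h) = [h % 2, h / 2 % 2, h / 2 / 2 % 2, h / 2 / 2 / 2 % 2] := by
  -- expand pvBitsB level by level, splitting on positivity at each level
  by_cases h0 : h > 0
  · rw [pvBitsB_pos h0]
    by_cases h1 : h / 2 > 0
    · rw [pvBitsB_pos h1]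
      by_cases h2 : h / 2 / 2 > 0
      · rw [pvBitsB_pos h2]
        by_cases h3 : h / 2 / 2 / 2 > 0
        · rw [pvBitsB_pos h3]; simp [pvPad4]
        · rw [pvBitsB_nonpos h3]; simp [pvPad4]; omega
      · rw [pvBitsB_nonpos h2]
        have e3 : h / 2 / 2 / 2 = 0 := by omega
        simp [pvPad4, e3]; omega
    · rw [pvBitsB_nonpos h1]
      have e2 : h / 2 / 2 = 0 := by omega
      have e3 : h / 2 / 2 / 2 = 0 := by omega
      simp [pvPad4, e2]; omega
  · rw [pvBitsB_nonpos h0]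
    have e1 : h = 0 := by omega
    simp [pvPad4, e1]

theorem pvRowA (r : Int) :
    ((PySem.List.pyRange 0 4 1).foldl
        (fun (st : List Int × Int) _ =>
          (st.1 ++ [PySem.Int.mod st.2 2], PySem.Int.floordiv st.2 2))
        ([], r)).1
      = [PySem.Int.mod r 2,
         PySem.Int.mod (PySem.Int.floordiv r 2) 2,
         PySem.Int.mod (PySem.Int.floordiv (PySem.Int.floordiv r 2) 2) 2,
         PySem.Int.mod (PySem.Int.floordiv (PySem.Int.floordiv (PySem.Int.floordiv r 2) 2) 2) 2] := by
  have : PySem.List.pyRange 0 4 1 = [0, 1, 2, 3] := by decide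
  rw [this]
  simp [List.foldl]

theorem pvRowA_eq_pad {h : Int} (hp : h > 0) :
    ((PySem.List.pyRange 0 4 1).foldl
        (fun (st : List Int × Int) _ =>
          (st.1 ++ [PySem.Int.mod st.2 2], PySem.Int.floordiv st.2 2))
        ([], PySem.Int.mod h 16)).1
      = pvPad4 (pvBitsB h) := by
  rw [pvRowA, pvPad4_bits (by omega : (0:Int) ≤ h)]
  have m16 := PySem.Int.mod_eq_emod_of_pos (a := h) (by omega : (0:Int) < 16)
  rw [m16]
  rw [PySem.Int.floordiv_eq_ediv_of_pos (a := h % 16) (by omega : (0:Int) < 2)]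
  rw [PySem.Int.floordiv_eq_ediv_of_pos (a := h % 16 / 2) (by omega : (0:Int) < 2)]
  rw [PySem.Int.floordiv_eq_ediv_of_pos (a := h % 16 / 2 / 2) (by omega : (0:Int) < 2)]
  rw [PySem.Int.mod_eq_emod_of_pos (a := h % 16) (by omega : (0:Int) < 2)]
  rw [PySem.Int.mod_eq_emod_of_pos (a := h % 16 / 2) (by omega : (0:Int) < 2)]
  rw [PySem.Int.mod_eq_emod_of_pos (a := h % 16 / 2 / 2) (by omega : (0:Int) < 2)]
  rw [PySem.Int.mod_eq_emod_of_pos (a := h % 16 / 2 / 2 / 2) (by omega : (0:Int) < 2)]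
  have : (h % 16) % 2 = h % 2 ∧ (h % 16) / 2 % 2 = h / 2 % 2 ∧
      (h % 16) / 2 / 2 % 2 = h / 2 / 2 % 2 ∧ (h % 16) / 2 / 2 / 2 % 2 = h / 2 / 2 / 2 % 2 := by
    omega
  simp [this.1, this.2.1, this.2.2.1, this.2.2.2]

theorem pvChunksB_cons (bits : List Int) (hne : bits ≠ []) :
    pvChunksB bits = pvPad4 bits :: pvChunksB (bits.drop 4) := by
  rw [pvChunksB]; simp [hne, pvPad4]

theorem pv_main (h : Int) : unhash_board h = pvChunksB (pvBitsB h) := by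
  by_cases hp : h > 0
  · have hlt : (PySem.Int.floordiv h 16).toNat < h.toNat := by
      rw [PySem.Int.floordiv_eq_ediv_of_pos (by omega : (0:Int) < 16)]; omega
    have ih := pv_main (PySem.Int.floordiv h 16)
    rw [unhash_board]
    simp only [hp, dif_pos]
    have hne : pvBitsB h ≠ [] := by rw [pvBitsB_pos hp]; simp
    rw [pvChunksB_cons _ hne, pvRowA_eq_pad hp, ih,
        PySem.Int.floordiv_eq_ediv_of_pos (a := h) (by omega : (0:Int) < 16),
        pvBitsB_drop_four]
  · rw [unhash_board, pvBitsB_nonpos hp]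
    simp [hp, pvChunksB]
termination_by h.toNat

-- ===== VERDICT (by name: the statement is the Claim_ definition above) =====
theorem unhash_board_spec : Claim_equal_unhash_board := by
  intro h _
  show unhash_board h = unhash_board_alt h
  rw [unhash_board_alt, pv_main]
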